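-- pv_equiv track=rewrite | github.com/MaiPriyanshuHoooon/triageX | core/parsers.py | parse_arp_table
-- ===== SOURCE A (Python) =====
-- def escape_html(text):
--     """Escape special HTML characters"""
--     if not text:
--         return ""
--     return (str(text)
--             .replace("&", "&amp;")
--             .replace("<", "&lt;")
--             .replace(">", "&gt;")
--             .replace('"', "&quot;")
--             .replace("'", "&#x27;"))
--
-- def parse_arp_table(lines):
--     """Parse arp -a output into table"""
--     html = '<div class="arp-output">\n'
--
--     in_table = False
--     current_interface = ""
--
--     for line in lines:
--         # Check for interface header
--         if 'Interface:' in line: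
--             if in_table:
--                 html += '  </tbody>\n</table>\n<br>\n'
--             current_interface = line.strip()
--             html += f'<p><strong>{escape_html(current_interface)}</strong></p>\n'
--             html += '<table class="data-table">\n'
--             html += '  <thead>\n    <tr><th>Internet Address</th><th>Physical Address</th><th>Type</th></tr>\n  </thead>\n'
--             html += '  <tbody>\n'
--             in_table = True
--             continue
--
--         # Skip header line
--         if 'Internet Address' in line or 'Physical Address' in line:
--             continue
--
--         # Parse data lines
--         if in_table and line.strip():
--             parts = line.split()
--             if len(parts) >= 2:
--                 ip = parts[0]
--                 mac = parts[1] if len(parts) > 1 else ''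
--                 type_val = parts[2] if len(parts) > 2 else ''
--                 html += f'    <tr><td>{escape_html(ip)}</td><td>{escape_html(mac)}</td><td>{escape_html(type_val)}</td></tr>\n'
--
--     if in_table:
--         html += '  </tbody>\n</table>\n'
--
--     html += '</div>'
--     return html
-- ===== SOURCE B (Python) =====
-- def escape_html(text):
--     """Escape special HTML characters"""
--     if not text:
--         return ""
--     return (str(text)
--             .replace("&", "&amp;")
--             .replace("<", "&lt;")
--             .replace(">", "&gt;")
--             .replace('"', "&quot;")
--             .replace("'", "&#x27;"))
--
-- def parse_arp_table(lines):
--     """Parse arp -a output into table (two-pass: structure first, render second)"""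
--     # Pass 1: collect sections as (header, rows) with rows = (ip, mac, type)
--     sections = []
--     header = None
--     rows = []
--     for line in lines:
--         if 'Interface:' in line:
--             if header is not None:
--                 sections.append((header, rows))
--             header = line.strip()
--             rows = []
--         elif 'Internet Address' in line or 'Physical Address' in line:
--             continue
--         elif header is not None and line.strip():
--             parts = line.split()
--             if len(parts) >= 2:
--                 rows.append((parts[0], parts[1], parts[2] if len(parts) > 2 else ''))
--     if header is not None:
--         sections.append((header, rows))
--
--     # Pass 2: render
--     html = '<div class="arp-output">\n'
--     sep_needed = False
--     for hdr, rws in sections: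
--         if sep_needed:
--             html += '<br>\n'
--         html += f'<p><strong>{escape_html(hdr)}</strong></p>\n'
--         html += '<table class="data-table">\n'
--         html += '  <thead>\n    <tr><th>Internet Address</th><th>Physical Address</th><th>Type</th></tr>\n  </thead>\n'
--         html += '  <tbody>\n'
--         for ip, mac, type_val in rws:
--             html += f'    <tr><td>{escape_html(ip)}</td><td>{escape_html(mac)}</td><td>{escape_html(type_val)}</td></tr>\n'
--         html += '  </tbody>\n</table>\n'
--         sep_needed = True
--     html += '</div>'
--     return html
-- ===== Notes on version B (the rewrite author's own statement) =====
-- stated objective: alternative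
-- what changed: B separates parsing from rendering: a first pass builds a structured list of (interface header, row-tuples) sections, and a second pass renders each section to HTML, instead of A's single pass that interleaves parsing with incremental string building and an in_table flag.
import Mathlib
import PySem

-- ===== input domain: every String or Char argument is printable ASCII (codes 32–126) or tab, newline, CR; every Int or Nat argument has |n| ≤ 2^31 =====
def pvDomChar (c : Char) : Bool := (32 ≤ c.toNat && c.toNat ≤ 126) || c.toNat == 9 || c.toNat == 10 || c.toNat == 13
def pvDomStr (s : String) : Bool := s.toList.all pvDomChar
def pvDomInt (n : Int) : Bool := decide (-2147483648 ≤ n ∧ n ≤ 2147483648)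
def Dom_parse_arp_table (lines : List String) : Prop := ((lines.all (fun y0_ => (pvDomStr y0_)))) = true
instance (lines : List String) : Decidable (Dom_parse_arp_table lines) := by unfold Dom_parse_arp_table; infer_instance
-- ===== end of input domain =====

-- B re-implements the parser as two passes (build a structured section list, then render it);
-- same output as A on every input, no speed claim.

-- ===== PORT A =====
def escapeHtml (text : String) : String :=
  if PySem.Str.len text == 0 then ""
  else
    PySem.Str.replace (PySem.Str.replace (PySem.Str.replace (PySem.Str.replace
      (PySem.Str.replace text "&" "&amp;") "<" "&lt;") ">" "&gt;") "\"" "&quot;") "'" "&#x27;"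

-- loop body of A's single for-loop; state = (html, in_table)
def stepA (st : String × Bool) (line : String) : String × Bool :=
  if PySem.Str.isIn "Interface:" line then
    let html := if st.2 then st.1 ++ "  </tbody>\n</table>\n<br>\n" else st.1
    let currentInterface := PySem.Str.strip line
    let html := html ++ "<p><strong>" ++ escapeHtml currentInterface ++ "</strong></p>\n"
    let html := html ++ "<table class=\"data-table\">\n"
    let html := html ++ "  <thead>\n    <tr><th>Internet Address</th><th>Physical Address</th><th>Type</th></tr>\n  </thead>\n"
    let html := html ++ "  <tbody>\n"
    (html, true)
  else if PySem.Str.isIn "Internet Address" line || PySem.Str.isIn "Physical Address" line then st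
  else if st.2 && !(PySem.Str.len (PySem.Str.strip line) == 0) then
    let parts := PySem.Str.split₀ line
    if 2 ≤ parts.length then
      let ip := parts.getD 0 ""
      let mac := if 1 < parts.length then parts.getD 1 "" else ""
      let typeVal := if 2 < parts.length then parts.getD 2 "" else ""
      (st.1 ++ "    <tr><td>" ++ escapeHtml ip ++ "</td><td>" ++ escapeHtml mac ++ "</td><td>" ++ escapeHtml typeVal ++ "</td></tr>\n", st.2)
    else st
  else st

def parse_arp_table (lines : List String) : String :=
  let st := lines.foldl stepA ("<div class=\"arp-output\">\n", false)
  let html := if st.2 then st.1 ++ "  </tbody>\n</table>\n" else st.1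
  html ++ "</div>"

-- ===== PORT B =====
-- pass 1 loop body: state = (sections, current header (None before the first 'Interface:'), current rows)
def stepB (st : List (String × List (String × String × String)) × Option String × List (String × String × String))
    (line : String) : List (String × List (String × String × String)) × Option String × List (String × String × String) :=
  if PySem.Str.isIn "Interface:" line then
    ((match st.2.1 with
      | some h => st.1 ++ [(h, st.2.2)]
      | none => st.1),
     some (PySem.Str.strip line), [])
  else if PySem.Str.isIn "Internet Address" line || PySem.Str.isIn "Physical Address" line then st
  else
    match st.2.1 with
    | some _ =>
      if !(PySem.Str.len (PySem.Str.strip line) == 0) then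
        let parts := PySem.Str.split₀ line
        if 2 ≤ parts.length then
          (st.1, st.2.1, st.2.2 ++ [(parts.getD 0 "", parts.getD 1 "",
            if 2 < parts.length then parts.getD 2 "" else "")])
        else st
      else st
    | none => st

-- pass 2 loop body: render one section; state = (html, separator_needed)
def stepR (st : String × Bool) (sec : String × List (String × String × String)) : String × Bool :=
  let html := if st.2 then st.1 ++ "<br>\n" else st.1
  let html := html ++ "<p><strong>" ++ escapeHtml sec.1 ++ "</strong></p>\n"
  let html := html ++ "<table class=\"data-table\">\n"
  let html := html ++ "  <thead>\n    <tr><th>Internet Address</th><th>Physical Address</th><th>Type</th></tr>\n  </thead>\n"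
  let html := html ++ "  <tbody>\n"
  let html := sec.2.foldl (fun h r => h ++ "    <tr><td>" ++ escapeHtml r.1 ++ "</td><td>" ++ escapeHtml r.2.1 ++ "</td><td>" ++ escapeHtml r.2.2 ++ "</td></tr>\n") html
  (html ++ "  </tbody>\n</table>\n", true)

def parse_arp_table_alt (lines : List String) : String :=
  let p := lines.foldl stepB ([], none, [])
  let sections := match p.2.1 with
    | some h => p.1 ++ [(h, p.2.2)]
    | none => p.1
  let r := sections.foldl stepR ("<div class=\"arp-output\">\n", false)
  r.1 ++ "</div>"

-- ===== PRECONDITION & SPEC =====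
def Spec_parse_arp_table (lines : List String) (out : String) : Prop := out = parse_arp_table_alt lines
instance (lines : List String) (out : String) : Decidable (Spec_parse_arp_table lines out) := by unfold Spec_parse_arp_table; infer_instance

-- ===== CLAIM (what is proved, stated in full; the proofs are below) =====
def Claim_equal_parse_arp_table : Prop := ∀ (lines : List String), Dom_parse_arp_table lines → Spec_parse_arp_table lines (parse_arp_table lines)

-- ===== LEMMAS AND PROOFS =====

-- rendering of one data row
def rowH (r : String × String × String) : String :=
  "    <tr><td>" ++ escapeHtml r.1 ++ "</td><td>" ++ escapeHtml r.2.1 ++ "</td><td>" ++ escapeHtml r.2.2 ++ "</td></tr>\n"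

def rowsStr (rows : List (String × String × String)) : String :=
  rows.foldl (fun h r => h ++ rowH r) ""

-- header paragraph + table opening for one section
def hdrH (h : String) : String :=
  "<p><strong>" ++ escapeHtml h ++ "</strong></p>\n" ++ "<table class=\"data-table\">\n"
    ++ "  <thead>\n    <tr><th>Internet Address</th><th>Physical Address</th><th>Type</th></tr>\n  </thead>\n"
    ++ "  <tbody>\n"

def closeS : String := "  </tbody>\n</table>\n"

def secC (s : String × List (String × String × String)) : String := hdrH s.1 ++ rowsStr s.2 ++ closeS

-- closed sections, each followed by a <br>
def doneStr (l : List (String × List (String × String × String))) : String :=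
  l.foldr (fun s acc => secC s ++ ("<br>\n" ++ acc)) ""

-- sections each preceded by a <br>
def brList (l : List (String × List (String × String × String))) : String :=
  l.foldr (fun s acc => "<br>\n" ++ (secC s ++ acc)) ""

-- A's html accumulator as a function of B's pass-1 state
def absB (done : List (String × List (String × String × String))) (h? : Option String)
    (rows : List (String × String × String)) : String :=
  match h? with
  | none => "<div class=\"arp-output\">\n"
  | some h => "<div class=\"arp-output\">\n" ++ doneStr done ++ hdrH h ++ rowsStr rows

-- pass-1 invariant: before the first interface header nothing has been collected
def invB (st : List (String × List (String × String × String)) × Option String × List (String × String × String)) : Prop :=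
  st.2.1 = none → st.1 = [] ∧ st.2.2 = []

lemma rowsStr_nil : rowsStr [] = "" := rfl

lemma doneStr_nil : doneStr [] = "" := rfl

lemma foldl_rowH (rows : List (String × String × String)) (a : String) :
    rows.foldl (fun h r => h ++ rowH r) a = a ++ rowsStr rows := by
  induction rows generalizing a with
  | nil => simp [rowsStr]
  | cons r rs ih =>
      simp only [rowsStr, List.foldl_cons]
      rw [ih (a ++ rowH r), ih ("" ++ rowH r)]
      simp [String.append_assoc]

lemma foldl_rowH' (rows : List (String × String × String)) (a : String) :
    rows.foldl (fun h r => h ++ "    <tr><td>" ++ escapeHtml r.1 ++ "</td><td>" ++ escapeHtml r.2.1 ++ "</td><td>" ++ escapeHtml r.2.2 ++ "</td></tr>\n") a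
      = a ++ rowsStr rows := by
  have hfun : (fun (h : String) (r : String × String × String) =>
        h ++ "    <tr><td>" ++ escapeHtml r.1 ++ "</td><td>" ++ escapeHtml r.2.1 ++ "</td><td>" ++ escapeHtml r.2.2 ++ "</td></tr>\n")
      = fun (h : String) (r : String × String × String) => h ++ rowH r := by
    funext h r
    simp [rowH, String.append_assoc]
  rw [hfun, foldl_rowH]

lemma rowsStr_append (rows : List (String × String × String)) (r : String × String × String) :
    rowsStr (rows ++ [r]) = rowsStr rows ++ rowH r := by
  simp [rowsStr, List.foldl_append]

lemma doneStr_shift (l : List (String × List (String × String × String))) (x : String) :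
    l.foldr (fun s acc => secC s ++ ("<br>\n" ++ acc)) x = doneStr l ++ x := by
  induction l with
  | nil => simp [doneStr]
  | cons s t ih => simp [doneStr, ih, String.append_assoc]

lemma doneStr_append (l : List (String × List (String × String × String)))
    (s : String × List (String × String × String)) :
    doneStr (l ++ [s]) = doneStr l ++ (secC s ++ "<br>\n") := by
  simp only [doneStr, List.foldr_append, List.foldr_cons, List.foldr_nil]
  rw [doneStr_shift]
  simp [doneStr]

-- one combined step: A's step tracks B's pass-1 step through absB, and the invariant is kept
lemma step_both (st : List (String × List (String × String × String)) × Option String × List (String × String × String))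
    (hinv : invB st) (line : String) :
    stepA (absB st.1 st.2.1 st.2.2, st.2.1.isSome) line
      = (absB (stepB st line).1 (stepB st line).2.1 (stepB st line).2.2, (stepB st line).2.1.isSome)
      ∧ invB (stepB st line) := by
  obtain ⟨done, h?, rows⟩ := st
  by_cases hI : PySem.Chars.isIn ['I','n','t','e','r','f','a','c','e',':'] line.toList = true
  · cases h? with
    | none =>
        obtain ⟨hd, hr⟩ := hinv rfl
        subst hd; subst hr
        refine ⟨?_, ?_⟩
        · simp [stepA, stepB, hI, absB, doneStr_nil, rowsStr_nil, hdrH, String.append_assoc]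
          simp [← String.append_assoc]
        · intro h; simp [stepB, hI] at h
    | some h0 =>
        refine ⟨?_, ?_⟩
        · simp [stepA, stepB, hI, absB, doneStr_append, secC, hdrH, closeS, rowsStr_nil, String.append_assoc]
          simp [← String.append_assoc]
        · intro h; simp [stepB, hI] at h
  · by_cases hH : (PySem.Chars.isIn ['I','n','t','e','r','n','e','t',' ','A','d','d','r','e','s','s'] line.toList = true
        ∨ PySem.Chars.isIn ['P','h','y','s','i','c','a','l',' ','A','d','d','r','e','s','s'] line.toList = true)
    · refine ⟨?_, ?_⟩
      · simp [stepA, stepB, hI, hH]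
      · simpa [stepB, hI, hH] using hinv
    · cases h? with
      | none =>
          refine ⟨?_, ?_⟩
          · simp [stepA, stepB, hI, hH, absB]
          · simpa [stepB, hI, hH] using hinv
      | some h0 =>
          by_cases hs : PySem.Chars.strip line.toList = []
          · refine ⟨?_, ?_⟩
            · simp [stepA, stepB, hI, hH, hs, absB]
            · simpa [stepB, hI, hH, hs] using hinv
          · by_cases hp : 2 ≤ (PySem.Str.split₀ line).length
            · have h1 : 1 < (PySem.Str.split₀ line).length := by omega
              refine ⟨?_, ?_⟩
              · simp [stepA, stepB, hI, hH, hs, hp, h1, absB, rowsStr_append, rowH, String.append_assoc]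
              · intro h; simp [stepB, hI, hH, hs, hp] at h
            · refine ⟨?_, ?_⟩
              · simp [stepA, stepB, hI, hH, hs, hp, absB]
              · intro h
                simp [stepB, hI, hH, hs, hp] at h

lemma loop_eq (lines : List String)
    (st : List (String × List (String × String × String)) × Option String × List (String × String × String))
    (hinv : invB st) :
    lines.foldl stepA (absB st.1 st.2.1 st.2.2, st.2.1.isSome)
      = (absB (lines.foldl stepB st).1 (lines.foldl stepB st).2.1 (lines.foldl stepB st).2.2,
         (lines.foldl stepB st).2.1.isSome)
      ∧ invB (lines.foldl stepB st) := by
  induction lines generalizing st with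
  | nil => exact ⟨rfl, hinv⟩
  | cons l ls ih =>
      obtain ⟨he, hi⟩ := step_both st hinv l
      simpa [List.foldl_cons, he] using ih (stepB st l) hi

-- one render step appends (separator +) one closed section
lemma stepR_eq (st : String × Bool) (sec : String × List (String × String × String)) :
    stepR st sec = ((if st.2 then st.1 ++ "<br>\n" else st.1) ++ secC sec, true) := by
  simp only [stepR]
  rw [foldl_rowH']
  simp [secC, hdrH, closeS, String.append_assoc]

lemma render_true (l : List (String × List (String × String × String))) (html : String) :
    l.foldl stepR (html, true) = (html ++ brList l, true) := by
  induction l generalizing html with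
  | nil => simp [brList]
  | cons s t ih =>
      rw [List.foldl_cons, stepR_eq]
      simp only [if_pos]
      rw [ih]
      simp [brList, String.append_assoc]

lemma brList_structure (ds : List (String × List (String × String × String)))
    (s : String × List (String × String × String)) :
    brList (ds ++ [s]) = "<br>\n" ++ (doneStr ds ++ secC s) := by
  induction ds with
  | nil => simp [brList, doneStr]
  | cons t ts ih =>
      rw [List.cons_append]
      rw [show brList (t :: (ts ++ [s])) = "<br>\n" ++ (secC t ++ brList (ts ++ [s])) from rfl, ih]
      rw [show doneStr (t :: ts) = secC t ++ ("<br>\n" ++ doneStr ts) from rfl]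
      simp [String.append_assoc]

lemma render_final (done : List (String × List (String × String × String)))
    (h : String) (rows : List (String × String × String)) (html : String) :
    ((done ++ [(h, rows)]).foldl stepR (html, false)).1
      = html ++ doneStr done ++ hdrH h ++ rowsStr rows ++ closeS := by
  cases done with
  | nil =>
      simp only [List.nil_append, List.foldl_cons, List.foldl_nil, stepR_eq]
      simp [secC, doneStr_nil, String.append_assoc]
  | cons d ds =>
      simp only [List.cons_append, List.foldl_cons, stepR_eq]
      rw [show ((if (("<div" : String), false).2 then html ++ "<br>\n" else html)) = html from rfl]
      rw [render_true, brList_structure]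
      rw [show doneStr (d :: ds) = secC d ++ ("<br>\n" ++ doneStr ds) from rfl]
      simp [secC, String.append_assoc]

-- ===== VERDICT (by name: the statement is the Claim_ definition above) =====
theorem parse_arp_table_spec : Claim_equal_parse_arp_table := by
  unfold Claim_equal_parse_arp_table
  intro lines _
  unfold Spec_parse_arp_table
  have h0 : invB (([], none, []) : List (String × List (String × String × String)) × Option String × List (String × String × String)) := by
    intro _; exact ⟨rfl, rfl⟩
  obtain ⟨he, hi⟩ := loop_eq lines ([], none, []) h0
  have he' : lines.foldl stepA ("<div class=\"arp-output\">\n", false)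
      = (absB (lines.foldl stepB ([], none, [])).1 (lines.foldl stepB ([], none, [])).2.1 (lines.foldl stepB ([], none, [])).2.2,
         (lines.foldl stepB ([], none, [])).2.1.isSome) := he
  have hA : parse_arp_table lines
      = (if (lines.foldl stepA ("<div class=\"arp-output\">\n", false)).2
         then (lines.foldl stepA ("<div class=\"arp-output\">\n", false)).1 ++ "  </tbody>\n</table>\n"
         else (lines.foldl stepA ("<div class=\"arp-output\">\n", false)).1) ++ "</div>" := rfl
  have hB : parse_arp_table_alt lines
      = ((match (lines.foldl stepB ([], none, [])).2.1 with
          | some h => (lines.foldl stepB ([], none, [])).1 ++ [(h, (lines.foldl stepB ([], none, [])).2.2)]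
          | none => (lines.foldl stepB ([], none, [])).1).foldl stepR ("<div class=\"arp-output\">\n", false)).1 ++ "</div>" := rfl
  rw [hA, hB, he']
  cases hh : (lines.foldl stepB ([], none, [])).2.1 with
  | none =>
      obtain ⟨hd, _⟩ := hi hh
      simp [hd, absB]
  | some h =>
      simp only [Option.isSome_some, absB]
      rw [render_final]
      simp [closeS, String.append_assoc]
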